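-- pv_equiv track=rewrite | github.com/lukaas33/lukaas33.github.io | public/webpages/algorithms/olympiade/storage/code/Weg.py | genField
-- ===== SOURCE A (Python) =====
-- def genField(plots):
--     ''' Generates the full field '''
--     field = [['[ ]' for b in range(24)] for a in range(25)]
--
--     for rnum, row in enumerate(field):
--         for cnum, cell in enumerate(row):
--             for plot in plots:
--                 if plot == (rnum + 1, cnum + 1):
--                     field[rnum][cnum] = '[X]'
--
--     return field
-- ===== SOURCE B (Python) =====
-- def genField(plots):
--     ''' Generates the full field '''
--     field = [['[ ]'] * 24 for _ in range(25)]
--     for plot in plots: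
--         if len(plot) == 2:
--             r, c = plot
--             if 1 <= r <= 25 and 1 <= c <= 24:
--                 field[r - 1][c - 1] = '[X]'
--     return field
-- ===== Notes on version B (the rewrite author's own statement) =====
-- stated objective: faster
-- what changed: A scans the whole plots list once for each of the 600 grid cells; B builds the blank grid and makes a single pass over plots, writing each in-range 2-element plot directly into its cell.
import Mathlib
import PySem

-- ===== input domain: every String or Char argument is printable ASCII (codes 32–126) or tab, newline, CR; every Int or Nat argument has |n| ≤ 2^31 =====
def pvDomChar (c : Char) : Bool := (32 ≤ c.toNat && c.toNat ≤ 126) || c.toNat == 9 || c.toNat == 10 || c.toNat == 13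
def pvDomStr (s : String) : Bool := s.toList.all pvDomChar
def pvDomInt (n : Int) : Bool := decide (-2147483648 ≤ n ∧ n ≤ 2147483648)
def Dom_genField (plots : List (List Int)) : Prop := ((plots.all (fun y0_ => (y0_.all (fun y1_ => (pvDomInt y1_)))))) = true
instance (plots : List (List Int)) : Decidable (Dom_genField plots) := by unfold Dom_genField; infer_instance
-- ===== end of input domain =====

-- B replaces A's per-cell scan of plots (600 scans) by one direct-write pass over plots.

-- field[r][c] = '[X]' (exact: Lean's List.set, like Python's in-range assignment; indices here are always in range when the row exists)
def pvMark (f : List (List String)) (r c : Nat) : List (List String) :=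
  f.set r ((f.getD r []).set c "[X]")

-- ===== PORT A =====
def genField (plots : List (List Int)) : List (List String) :=
  let field := (List.range 25).map (fun _ => (List.range 24).map (fun _ => "[ ]"))
  (List.range 25).foldl (fun f (rnum : Nat) =>
    (List.range 24).foldl (fun f (cnum : Nat) =>
      plots.foldl (fun f plot =>
        if plot = [((rnum : Int)) + 1, ((cnum : Int)) + 1] then pvMark f rnum cnum else f) f) f) field

-- ===== PORT B =====
def genField_alt (plots : List (List Int)) : List (List String) :=
  plots.foldl (fun f plot =>
    match plot with
    | [r, c] =>
      if 1 ≤ r ∧ r ≤ 25 ∧ 1 ≤ c ∧ c ≤ 24 then pvMark f (r - 1).toNat (c - 1).toNat else f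
    | _ => f) ((List.range 25).map (fun _ => List.replicate 24 "[ ]"))

-- ===== PRECONDITION & SPEC =====
def Spec_genField (plots : List (List Int)) (out : List (List String)) : Prop := out = genField_alt plots
instance (plots : List (List Int)) (out : List (List String)) : Decidable (Spec_genField plots out) := by unfold Spec_genField; infer_instance

-- ===== CLAIM (what is proved, stated in full; the proofs are below) =====
def Claim_equal_genField : Prop := ∀ (plots : List (List Int)), Dom_genField plots → Spec_genField plots (genField plots)

-- ===== LEMMAS AND PROOFS =====

-- cell (i, j) of a grid, and the grid shape both programs maintain
def pvCell (G : List (List String)) (i j : Nat) : String := (G.getD i []).getD j ""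

def pvDims (G : List (List String)) : Prop :=
  G.length = 25 ∧ ∀ i, i < 25 → (G.getD i []).length = 24

theorem getD_set_self {α : Type} (l : List α) (i : Nat) (x : α) (d : α) (h : i < l.length) :
    (l.set i x).getD i d = x := by
  simp [List.getD_eq_getElem?_getD, h]

theorem getD_set_ne {α : Type} (l : List α) (i i' : Nat) (x : α) (d : α) (h : i' ≠ i) :
    (l.set i x).getD i' d = l.getD i' d := by
  simp [List.getD_eq_getElem?_getD, Ne.symm h]

theorem mark_dims (G : List (List String)) (r c : Nat) (hG : pvDims G) :
    pvDims (pvMark G r c) := by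
  obtain ⟨hlen, hrow⟩ := hG
  refine ⟨by simp [pvMark, hlen], ?_⟩
  intro i hi
  by_cases hir : i = r
  · subst hir
    rw [pvMark, getD_set_self _ _ _ _ (by omega), List.length_set]
    exact hrow i hi
  · rw [pvMark, getD_set_ne _ _ _ _ _ hir]
    exact hrow i hi

theorem cell_mark (G : List (List String)) (r c i j : Nat) :
    pvCell (pvMark G r c) i j =
      if i = r ∧ r < G.length ∧ j = c ∧ c < (G.getD r []).length then "[X]"
      else pvCell G i j := by
  unfold pvCell pvMark
  by_cases hir : i = r
  · subst hir
    by_cases hr : i < G.length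
    · rw [getD_set_self _ _ _ _ hr]
      by_cases hjc : j = c
      · subst hjc
        by_cases hc : j < (G.getD i []).length
        · rw [getD_set_self _ _ _ _ hc, if_pos ⟨rfl, hr, rfl, hc⟩]
        · rw [List.set_eq_of_length_le (by omega), if_neg (by tauto)]
      · rw [getD_set_ne _ _ _ _ _ hjc, if_neg (by tauto)]
    · rw [List.set_eq_of_length_le (by omega), if_neg (by tauto)]
  · rw [getD_set_ne _ _ _ _ _ hir, if_neg (by tauto)]

theorem mark_idem (G : List (List String)) (r c : Nat) :
    pvMark (pvMark G r c) r c = pvMark G r c := by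
  by_cases hr : r < G.length
  · unfold pvMark
    rw [getD_set_self _ _ _ _ hr, List.set_set, List.set_set]
  · have h1 : pvMark G r c = G := by
      unfold pvMark; exact List.set_eq_of_length_le (by omega)
    simp only [h1]

-- A's innermost loop: repeatedly applying the same idempotent update when a plot matches
theorem foldl_mark_once (l : List (List Int)) (v : List Int)
    (u : List (List String) → List (List String)) (hu : ∀ G, u (u G) = u G)
    (G : List (List String)) :
    l.foldl (fun G p => if p = v then u G else G) G =
      if l.contains v = true then u G else G := by
  induction l generalizing G with
  | nil => simp
  | cons p l ih =>
    simp only [List.foldl_cons]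
    by_cases hp : p = v
    · subst hp
      rw [if_pos rfl, ih (u G)]
      by_cases hc : l.contains p = true <;> simp [hu]
    · rw [if_neg hp, ih G]
      have hne : v ≠ p := fun h => hp h.symm
      simp [hne]

-- the inner (column) loop of A, with the plot scan already collapsed
theorem rowfold_cell (cnd : Nat → Bool) (r : Nat) (hr : r < 25) (m : Nat) (hm : m ≤ 24)
    (G : List (List String)) (hG : pvDims G) :
    pvDims ((List.range m).foldl (fun G c => if cnd c = true then pvMark G r c else G) G) ∧
    ∀ i j, i < 25 → j < 24 →
      pvCell ((List.range m).foldl (fun G c => if cnd c = true then pvMark G r c else G) G) i j =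
        if i = r ∧ j < m ∧ cnd j = true then "[X]" else pvCell G i j := by
  induction m with
  | zero => simp [hG]
  | succ m ih =>
    obtain ⟨hD, hC⟩ := ih (by omega)
    rw [List.range_succ (n := m), List.foldl_append]
    set G' := (List.range m).foldl (fun G c => if cnd c = true then pvMark G r c else G) G with hG'
    simp only [List.foldl_cons, List.foldl_nil]
    constructor
    · by_cases hc : cnd m = true
      · rw [if_pos hc]; exact mark_dims _ _ _ hD
      · rw [if_neg hc]; exact hD
    · intro i j hi hj
      by_cases hc : cnd m = true
      · rw [if_pos hc, cell_mark, hD.1, hD.2 r hr, hC i j hi hj]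
        by_cases hir : i = r
        · subst hir
          by_cases hjm : j = m
          · subst hjm
            rw [if_pos ⟨rfl, hr, rfl, by omega⟩, if_pos ⟨rfl, by omega, hc⟩]
          · have hlt : (j < m + 1) = (j < m) := by simp; omega
            rw [if_neg (by tauto)]; simp only [hlt]
        · have h1 : ¬ (i = r ∧ r < 25 ∧ j = m ∧ m < 24) := by tauto
          have h2 : ¬ (i = r ∧ j < m ∧ cnd j = true) := by tauto
          have h3 : ¬ (i = r ∧ j < m + 1 ∧ cnd j = true) := by tauto
          rw [if_neg h1, if_neg h2, if_neg h3]
      · rw [if_neg hc, hC i j hi hj]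
        by_cases hjm : j = m
        · subst hjm
          rw [if_neg (by tauto), if_neg (by tauto)]
        · have hlt : (j < m + 1) = (j < m) := by simp; omega
          simp only [hlt]

-- the outer (row) loop of A
theorem outerfold_cell (cnd : Nat → Nat → Bool) (n : Nat) (hn : n ≤ 25)
    (G : List (List String)) (hG : pvDims G) :
    pvDims ((List.range n).foldl (fun G r =>
        (List.range 24).foldl (fun G c => if cnd r c = true then pvMark G r c else G) G) G) ∧
    ∀ i j, i < 25 → j < 24 →
      pvCell ((List.range n).foldl (fun G r =>
          (List.range 24).foldl (fun G c => if cnd r c = true then pvMark G r c else G) G) G) i j =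
        if i < n ∧ cnd i j = true then "[X]" else pvCell G i j := by
  induction n with
  | zero => simp [hG]
  | succ n ih =>
    obtain ⟨hD, hC⟩ := ih (by omega)
    rw [List.range_succ (n := n), List.foldl_append]
    set G' := (List.range n).foldl (fun G r =>
        (List.range 24).foldl (fun G c => if cnd r c = true then pvMark G r c else G) G) G with hG'
    simp only [List.foldl_cons, List.foldl_nil]
    obtain ⟨hD', hC'⟩ := rowfold_cell (cnd n) n (by omega) 24 (le_refl _) G' hD
    refine ⟨hD', ?_⟩
    intro i j hi hj
    rw [hC' i j hi hj, hC i j hi hj]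
    by_cases hin : i = n
    · subst hin
      by_cases hc : cnd i j = true
      · rw [if_pos ⟨rfl, hj, hc⟩, if_pos ⟨by omega, hc⟩]
      · rw [if_neg (by tauto), if_neg (by tauto), if_neg (by tauto)]
    · have hlt : (i < n + 1) = (i < n) := by simp; omega
      rw [if_neg (by tauto)]; simp only [hlt]

-- B's single pass over plots
theorem bfold_cell (plots : List (List Int)) (G : List (List String)) (hG : pvDims G) :
    pvDims (plots.foldl (fun f plot =>
      match plot with
      | [r, c] =>
        if 1 ≤ r ∧ r ≤ 25 ∧ 1 ≤ c ∧ c ≤ 24 then pvMark f (r - 1).toNat (c - 1).toNat else f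
      | _ => f) G) ∧
    ∀ i j, i < 25 → j < 24 →
      pvCell (plots.foldl (fun f plot =>
        match plot with
        | [r, c] =>
          if 1 ≤ r ∧ r ≤ 25 ∧ 1 ≤ c ∧ c ≤ 24 then pvMark f (r - 1).toNat (c - 1).toNat else f
        | _ => f) G) i j =
        if plots.contains [((i : Int)) + 1, ((j : Int)) + 1] = true then "[X]"
        else pvCell G i j := by
  induction plots generalizing G with
  | nil => simp [hG]
  | cons p l ih =>
    rcases p with _ | ⟨r, rest⟩
    · simp only [List.foldl_cons]
      obtain ⟨hD, hC⟩ := ih G hG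
      refine ⟨hD, ?_⟩
      intro i j hi hj
      rw [hC i j hi hj]
      have hcc : (([] : List Int) :: l).contains [((i : Int)) + 1, ((j : Int)) + 1]
          = l.contains [((i : Int)) + 1, ((j : Int)) + 1] := by simp
      rw [hcc]
    rcases rest with _ | ⟨c, rest2⟩
    · simp only [List.foldl_cons]
      obtain ⟨hD, hC⟩ := ih G hG
      refine ⟨hD, ?_⟩
      intro i j hi hj
      rw [hC i j hi hj]
      have hcc : ([r] :: l).contains [((i : Int)) + 1, ((j : Int)) + 1]
          = l.contains [((i : Int)) + 1, ((j : Int)) + 1] := by simp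
      rw [hcc]
    rcases rest2 with _ | ⟨x, xs⟩
    swap
    · simp only [List.foldl_cons]
      obtain ⟨hD, hC⟩ := ih G hG
      refine ⟨hD, ?_⟩
      intro i j hi hj
      rw [hC i j hi hj]
      have hcc : ((r :: c :: x :: xs) :: l).contains [((i : Int)) + 1, ((j : Int)) + 1]
          = l.contains [((i : Int)) + 1, ((j : Int)) + 1] := by simp
      rw [hcc]
    simp only [List.foldl_cons]
    by_cases hrc : 1 ≤ r ∧ r ≤ 25 ∧ 1 ≤ c ∧ c ≤ 24
    · rw [if_pos hrc]
      obtain ⟨hD, hC⟩ := ih _ (mark_dims _ _ _ hG)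
      refine ⟨hD, ?_⟩
      intro i j hi hj
      rw [hC i j hi hj, cell_mark, hG.1, hG.2 (r - 1).toNat (by omega)]
      by_cases heq : r = ((i : Int)) + 1 ∧ c = ((j : Int)) + 1
      · have hpv : [r, c] = [((i : Int)) + 1, ((j : Int)) + 1] := by rw [heq.1, heq.2]
        have hcc : (([r, c]) :: l).contains [((i : Int)) + 1, ((j : Int)) + 1] = true := by
          simp [hpv]
        rw [hcc, if_pos rfl]
        by_cases hcl : l.contains [((i : Int)) + 1, ((j : Int)) + 1] = true
        · rw [if_pos hcl]
        · rw [if_neg hcl, if_pos ⟨by omega, by omega, by omega, by omega⟩]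
      · have h1 : ¬ (i = (r - 1).toNat ∧ (r - 1).toNat < 25 ∧
            j = (c - 1).toNat ∧ (c - 1).toNat < 24) := by omega
        rw [if_neg h1]
        have hcc : (([r, c]) :: l).contains [((i : Int)) + 1, ((j : Int)) + 1]
            = l.contains [((i : Int)) + 1, ((j : Int)) + 1] := by
          have hne : ¬ ([((i : Int)) + 1, ((j : Int)) + 1] = [r, c]) := by
            intro h
            refine heq ⟨by injection h with h1 h2; exact h1.symm, ?_⟩
            have := congrArg (fun (t : List Int) => t.getD 1 0) h
            simpa using this.symm
          simp [hne]
        rw [hcc]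
    · rw [if_neg hrc]
      obtain ⟨hD, hC⟩ := ih G hG
      refine ⟨hD, ?_⟩
      intro i j hi hj
      rw [hC i j hi hj]
      have hcc : (([r, c]) :: l).contains [((i : Int)) + 1, ((j : Int)) + 1]
          = l.contains [((i : Int)) + 1, ((j : Int)) + 1] := by
        have hne : ¬ ([((i : Int)) + 1, ((j : Int)) + 1] = [r, c]) := by
          intro h
          have ha : r = ((i : Int)) + 1 := by injection h with h1 h2; exact h1.symm
          have hb : c = ((j : Int)) + 1 := by
            have := congrArg (fun (t : List Int) => t.getD 1 0) h
            simpa using this.symm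
          exact hrc ⟨by omega, by omega, by omega, by omega⟩
        simp [hne]
      rw [hcc]

-- the blank 25x24 grid
theorem blank_dims : pvDims ((List.range 25).map (fun _ => List.replicate 24 "[ ]")) := by
  constructor
  · simp
  · intro i hi
    rw [List.getD_eq_getElem?_getD, List.getElem?_map, List.getElem?_range hi]
    simp

theorem getD_eq_getElem_of_lt {α : Type} (l : List α) (i : Nat) (d : α) (h : i < l.length) :
    l.getD i d = l[i] := by
  rw [List.getD_eq_getElem?_getD, List.getElem?_eq_getElem h]
  rfl

-- two grids of the proved shape with equal cells are equal
theorem grid_ext (G H : List (List String)) (hG : pvDims G) (hH : pvDims H)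
    (h : ∀ i j, i < 25 → j < 24 → pvCell G i j = pvCell H i j) : G = H := by
  apply List.ext_getElem (by rw [hG.1, hH.1])
  intro i h1 h2
  have hGi : G.getD i [] = G[i] := getD_eq_getElem_of_lt _ _ _ h1
  have hHi : H.getD i [] = H[i] := getD_eq_getElem_of_lt _ _ _ h2
  have hi25 : i < 25 := hG.1 ▸ h1
  have hGl : G[i].length = 24 := by rw [← hGi]; exact hG.2 i hi25
  have hHl : H[i].length = 24 := by rw [← hHi]; exact hH.2 i hi25
  apply List.ext_getElem (by omega)
  intro j hj1 hj2
  have hj24 : j < 24 := by omega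
  have := h i j hi25 hj24
  unfold pvCell at this
  rw [hGi, hHi, getD_eq_getElem_of_lt _ _ _ hj1, getD_eq_getElem_of_lt _ _ _ hj2] at this
  exact this

-- ===== VERDICT (by name: the statement is the Claim_ definition above) =====
theorem genField_spec : Claim_equal_genField := by
  intro plots _
  show genField plots = genField_alt plots
  unfold genField genField_alt
  have hfun : ∀ (rnum cnum : Nat) (f : List (List String)),
      plots.foldl (fun f plot =>
        if plot = [((rnum : Int)) + 1, ((cnum : Int)) + 1] then pvMark f rnum cnum else f) f =
      if plots.contains [((rnum : Int)) + 1, ((cnum : Int)) + 1] = true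
        then pvMark f rnum cnum else f :=
    fun r c f => foldl_mark_once plots _ _ (fun G => mark_idem G r c) f
  have hblank : ((List.range 24).map (fun _ => "[ ]")) = List.replicate 24 "[ ]" := by
    rw [List.map_const', List.length_range]
  simp only [hfun, hblank]
  obtain ⟨hDA, hCA⟩ := outerfold_cell
    (fun r c => plots.contains [((r : Int)) + 1, ((c : Int)) + 1]) 25 (le_refl _)
    ((List.range 25).map (fun _ => List.replicate 24 "[ ]")) blank_dims
  obtain ⟨hDB, hCB⟩ := bfold_cell plots
    ((List.range 25).map (fun _ => List.replicate 24 "[ ]")) blank_dims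
  apply grid_ext _ _ hDA hDB
  intro i j hi hj
  rw [hCA i j hi hj, hCB i j hi hj]
  by_cases hc : plots.contains [((i : Int)) + 1, ((j : Int)) + 1] = true
  · rw [if_pos ⟨hi, hc⟩, if_pos hc]
  · rw [if_neg (by tauto), if_neg hc]
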